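-- pv_equiv track=rewrite | github.com/SpacJoy/Remote-Controls | main.py | _parse_hotkey_string
-- ===== SOURCE A (Python) =====
-- def _parse_hotkey_string(hs: str) -> list[str]:
--     """将 'ctrl+alt+delete' 这类组合拆成有序列表，并统一命名。"""
--     if not hs:
--         return []
--     parts = [p.strip().lower() for p in hs.replace(" ", "").split("+") if p.strip()]
--     normalize = {
--         "control": "ctrl", "ctrl": "ctrl",
--         "alt": "alt",
--         "shift": "shift",
--         "win": "win", "super": "win", "meta": "win",
--         "enter": "enter", "return": "enter",
--         "esc": "esc", "escape": "esc",
--     }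
--     res = [normalize.get(p, p) for p in parts]
--     order = {"ctrl": 0, "alt": 1, "shift": 2, "win": 3}
--     res.sort(key=lambda x: (order.get(x, 9), x))
--     return res
-- ===== SOURCE B (Python) =====
-- MODIFIERS = ("ctrl", "alt", "shift", "win")
--
--
-- def _normalize(p):
--     if p == "control":
--         return "ctrl"
--     if p == "super" or p == "meta":
--         return "win"
--     if p == "return":
--         return "enter"
--     if p == "escape":
--         return "esc"
--     return p
--
--
-- def _parse_hotkey_string(hs: str) -> list[str]:
--     tokens = [_normalize(p.strip().lower())
--               for p in hs.replace(" ", "").split("+") if p.strip()]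
--     head = [t for m in MODIFIERS for t in tokens if t == m]
--     tail = sorted(t for t in tokens if t not in MODIFIERS)
--     return head + tail
-- ===== Notes on version B (the rewrite author's own statement) =====
-- stated objective: alternative
-- what changed: Replaces the dict-driven composite-key sort with a bucket pass: normalization becomes an if-chain function, modifiers are emitted by scanning the fixed priority list and collecting matching tokens, and the remaining tokens are sorted alphabetically and appended.
import Mathlib
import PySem

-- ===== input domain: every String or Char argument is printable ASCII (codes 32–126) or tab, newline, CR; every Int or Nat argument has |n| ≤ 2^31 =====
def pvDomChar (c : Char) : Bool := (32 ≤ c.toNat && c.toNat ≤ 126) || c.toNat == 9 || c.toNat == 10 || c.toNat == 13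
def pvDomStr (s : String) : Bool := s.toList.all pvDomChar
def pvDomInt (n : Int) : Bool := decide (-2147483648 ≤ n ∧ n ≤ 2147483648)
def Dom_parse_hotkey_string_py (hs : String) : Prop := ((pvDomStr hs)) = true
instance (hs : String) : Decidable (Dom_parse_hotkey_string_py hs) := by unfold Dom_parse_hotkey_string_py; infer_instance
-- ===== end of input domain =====

-- B replaces A's dict-driven composite-key sort by an if-chain normalizer plus a bucket pass:
-- modifiers collected in fixed priority order, then the remaining tokens sorted alphabetically.

-- ===== PORT A =====
-- sep "+" is a nonempty literal, so PySem.Str.split? is always `some`; the `.getD []` default is unreachable.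
def parse_hotkey_string_py (hs : String) : List String :=
  if hs = "" then []
  else
    let parts := (((PySem.Str.split? (PySem.Str.replace hs " " "") "+").getD []).filter
        (fun p => !(PySem.Str.strip p == ""))).map (fun p => PySem.Str.lower (PySem.Str.strip p))
    let normalize : PySem.Dict String String := PySem.Dict.ofList
      [("control","ctrl"),("ctrl","ctrl"),("alt","alt"),("shift","shift"),
       ("win","win"),("super","win"),("meta","win"),("enter","enter"),
       ("return","enter"),("esc","esc"),("escape","esc")]
    let res := parts.map (fun p => normalize.getD p p)
    let order : PySem.Dict String Int := PySem.Dict.ofList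
      [("ctrl",0),("alt",1),("shift",2),("win",3)]
    PySem.List.sorted res (fun x => toLex (order.getD x 9, x)) false

-- ===== PORT B =====
def pvNormalize (p : String) : String :=
  if p = "control" then "ctrl"
  else if p = "super" ∨ p = "meta" then "win"
  else if p = "return" then "enter"
  else if p = "escape" then "esc"
  else p

def pvModifiers : List String := ["ctrl", "alt", "shift", "win"]

def parse_hotkey_string_py_alt (hs : String) : List String :=
  let tokens := (((PySem.Str.split? (PySem.Str.replace hs " " "") "+").getD []).filter
      (fun p => !(PySem.Str.strip p == ""))).map
      (fun p => pvNormalize (PySem.Str.lower (PySem.Str.strip p)))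
  let head := pvModifiers.flatMap (fun m => tokens.filter (fun t => t == m))
  let tail := PySem.List.sorted (tokens.filter (fun t => !(pvModifiers.contains t))) (fun t => t) false
  head ++ tail

-- ===== PRECONDITION & SPEC =====
def Spec_parse_hotkey_string_py (hs : String) (out : List String) : Prop := out = parse_hotkey_string_py_alt hs
instance (hs : String) (out : List String) : Decidable (Spec_parse_hotkey_string_py hs out) := by unfold Spec_parse_hotkey_string_py; infer_instance

-- ===== CLAIM (what is proved, stated in full; the proofs are below) =====
def Claim_equal_parse_hotkey_string_py : Prop := ∀ (hs : String), Dom_parse_hotkey_string_py hs → Spec_parse_hotkey_string_py hs (parse_hotkey_string_py hs)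

-- ===== LEMMAS AND PROOFS =====

-- A's sort key read as a single lexicographic key
def pvKey (x : String) : Lex (Int × String) :=
  toLex (PySem.Dict.getD (PySem.Dict.ofList
    [("ctrl",(0:Int)),("alt",1),("shift",2),("win",3)]) x 9, x)

-- A's `order.get(x, 9)` value
def pvOrd (x : String) : Int :=
  PySem.Dict.getD (PySem.Dict.ofList [("ctrl",(0:Int)),("alt",1),("shift",2),("win",3)]) x 9

theorem pvKey_inj : Function.Injective pvKey := by
  intro a b h
  exact congrArg (fun z => (ofLex z).2) h

theorem pvOrd_eq (x : String) :
    pvOrd x = if x = "ctrl" then 0 else if x = "alt" then 1 else if x = "shift" then 2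
      else if x = "win" then 3 else 9 := by
  by_cases h1 : x = "ctrl"
  · subst h1; decide
  by_cases h2 : x = "alt"
  · subst h2; decide
  by_cases h3 : x = "shift"
  · subst h3; decide
  by_cases h4 : x = "win"
  · subst h4; decide
  simp [pvOrd, PySem.Dict.ofList, PySem.Dict.getD, PySem.Dict.get?, PySem.Dict.update,
    PySem.Dict.insert, PySem.Dict.empty, List.find?, h1, h2, h3, h4,
    show ("ctrl" == x) = false from by simp [beq_eq_false_iff_ne]; exact Ne.symm h1,
    show ("alt" == x) = false from by simp [beq_eq_false_iff_ne]; exact Ne.symm h2,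
    show ("shift" == x) = false from by simp [beq_eq_false_iff_ne]; exact Ne.symm h3,
    show ("win" == x) = false from by simp [beq_eq_false_iff_ne]; exact Ne.symm h4]

theorem pvNorm_eq (p : String) :
    PySem.Dict.getD (PySem.Dict.ofList
      [("control","ctrl"),("ctrl","ctrl"),("alt","alt"),("shift","shift"),
       ("win","win"),("super","win"),("meta","win"),("enter","enter"),
       ("return","enter"),("esc","esc"),("escape","esc")]) p p = pvNormalize p := by
  by_cases h1 : p = "control"
  · subst h1; decide
  by_cases h2 : p = "ctrl"
  · subst h2; decide
  by_cases h3 : p = "alt"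
  · subst h3; decide
  by_cases h4 : p = "shift"
  · subst h4; decide
  by_cases h5 : p = "win"
  · subst h5; decide
  by_cases h6 : p = "super"
  · subst h6; decide
  by_cases h7 : p = "meta"
  · subst h7; decide
  by_cases h8 : p = "enter"
  · subst h8; decide
  by_cases h9 : p = "return"
  · subst h9; decide
  by_cases h10 : p = "esc"
  · subst h10; decide
  by_cases h11 : p = "escape"
  · subst h11; decide
  simp [PySem.Dict.ofList, PySem.Dict.getD, PySem.Dict.get?, PySem.Dict.update,
    PySem.Dict.insert, PySem.Dict.empty, List.find?, pvNormalize,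
    h1, h6, h7, h9, h11,
    show ("control" == p) = false from by simp [beq_eq_false_iff_ne]; exact Ne.symm h1,
    show ("ctrl" == p) = false from by simp [beq_eq_false_iff_ne]; exact Ne.symm h2,
    show ("alt" == p) = false from by simp [beq_eq_false_iff_ne]; exact Ne.symm h3,
    show ("shift" == p) = false from by simp [beq_eq_false_iff_ne]; exact Ne.symm h4,
    show ("win" == p) = false from by simp [beq_eq_false_iff_ne]; exact Ne.symm h5,
    show ("super" == p) = false from by simp [beq_eq_false_iff_ne]; exact Ne.symm h6,
    show ("meta" == p) = false from by simp [beq_eq_false_iff_ne]; exact Ne.symm h7,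
    show ("enter" == p) = false from by simp [beq_eq_false_iff_ne]; exact Ne.symm h8,
    show ("return" == p) = false from by simp [beq_eq_false_iff_ne]; exact Ne.symm h9,
    show ("esc" == p) = false from by simp [beq_eq_false_iff_ne]; exact Ne.symm h10,
    show ("escape" == p) = false from by simp [beq_eq_false_iff_ne]; exact Ne.symm h11]

theorem pvCount_filter_eq_zero {p : String → Bool} {a : String} (h : p a = false) (l : List String) :
    List.count a (l.filter p) = 0 := by
  refine List.count_eq_zero.mpr (fun hm => ?_)
  rw [List.mem_filter, h] at hm
  exact absurd hm.2 (by simp)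

-- the bucket pass plus the leftover filter is a permutation of the token list
theorem pvCount_bucket (a m : String) (l : List String) :
    List.count a (l.filter (fun t => t == m)) = if a = m then List.count a l else 0 := by
  by_cases h : a = m
  · subst h
    rw [if_pos rfl]
    exact List.count_filter (by simp)
  · rw [if_neg h]
    exact pvCount_filter_eq_zero (p := fun t => t == m) (beq_eq_false_iff_ne.mpr h) l

theorem pvCount_tail (a : String) (l : List String) :
    List.count a (l.filter (fun t => !(["ctrl","alt","shift","win"] : List String).contains t)) =
    if a = "ctrl" ∨ a = "alt" ∨ a = "shift" ∨ a = "win" then 0 else List.count a l := by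
  by_cases h : a = "ctrl" ∨ a = "alt" ∨ a = "shift" ∨ a = "win"
  · rw [if_pos h]
    refine pvCount_filter_eq_zero ?_ l
    rcases h with h | h | h | h <;> subst h <;> decide
  · rw [if_neg h]
    rw [not_or, not_or, not_or] at h
    refine List.count_filter ?_
    simp [List.contains_eq_mem, h.1, h.2.1, h.2.2.1, h.2.2.2]

theorem pvPerm_core (l : List String) :
    (pvModifiers.flatMap (fun m => l.filter (fun t => t == m)) ++
      l.filter (fun t => !(pvModifiers.contains t))).Perm l := by
  refine List.perm_iff_count.mpr (fun a => ?_)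
  simp only [pvModifiers, List.flatMap_cons, List.flatMap_nil, List.append_nil,
    List.append_assoc, List.count_append]
  rw [pvCount_bucket, pvCount_bucket, pvCount_bucket, pvCount_bucket, pvCount_tail]
  split_ifs <;> simp_all

theorem pvKey_le_of_ord_lt {a b : String} (h : pvOrd a < pvOrd b) : pvKey a ≤ pvKey b :=
  Prod.Lex.toLex_le_toLex.mpr (Or.inl h)

theorem pvKey_le_of_ord_eq {a b : String} (h : pvOrd a = pvOrd b) (hab : a ≤ b) :
    pvKey a ≤ pvKey b :=
  Prod.Lex.toLex_le_toLex.mpr (Or.inr ⟨h, hab⟩)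

theorem pvMem_bucket {m t : String} {l : List String}
    (ht : t ∈ l.filter (fun t => t == m)) : t = m := by
  rw [List.mem_filter] at ht
  exact eq_of_beq ht.2

theorem pvBucket_pairwise (m : String) (l : List String) :
    (l.filter (fun t => t == m)).Pairwise (fun a b => pvKey a ≤ pvKey b) := by
  refine List.pairwise_of_forall_mem_list (fun a ha b hb => ?_)
  rw [pvMem_bucket ha, pvMem_bucket hb]

theorem pvTail_ord {b : String} {l : List String}
    (hb : b ∈ PySem.List.sorted (l.filter (fun t => !(pvModifiers.contains t))) (fun t => t) false) :
    pvOrd b = 9 := by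
  rw [PySem.List.mem_sorted, List.mem_filter] at hb
  have hc : ¬ (b = "ctrl" ∨ b = "alt" ∨ b = "shift" ∨ b = "win") := by
    intro hor
    have := hb.2
    rcases hor with h | h | h | h <;> subst h <;> simp [pvModifiers, List.contains_eq_mem] at this
  rw [not_or, not_or, not_or] at hc
  rw [pvOrd_eq]
  simp [hc.1, hc.2.1, hc.2.2.1, hc.2.2.2]

-- the bucket pass output is nondecreasing under A's sort key
theorem pvPairwise_core (l : List String) :
    (pvModifiers.flatMap (fun m => l.filter (fun t => t == m)) ++
      PySem.List.sorted (l.filter (fun t => !(pvModifiers.contains t))) (fun t => t) false).Pairwise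
      (fun a b => pvKey a ≤ pvKey b) := by
  have hord : ∀ m ∈ pvModifiers, pvOrd m < 9 := by
    intro m hm
    simp [pvModifiers] at hm
    rcases hm with h | h | h | h <;> subst h <;> decide
  have htail : ∀ a ∈ pvModifiers, ∀ b ∈ PySem.List.sorted
      (l.filter (fun t => !(pvModifiers.contains t))) (fun t => t) false, pvKey a ≤ pvKey b := by
    intro a ha b hb
    exact pvKey_le_of_ord_lt (by rw [pvTail_ord hb]; exact hord a ha)
  simp only [pvModifiers, List.flatMap_cons, List.flatMap_nil, List.append_nil, List.append_assoc]
  refine List.pairwise_append.mpr ⟨pvBucket_pairwise _ _, ?_, ?_⟩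
  · refine List.pairwise_append.mpr ⟨pvBucket_pairwise _ _, ?_, ?_⟩
    · refine List.pairwise_append.mpr ⟨pvBucket_pairwise _ _, ?_, ?_⟩
      · refine List.pairwise_append.mpr ⟨pvBucket_pairwise _ _, ?_, ?_⟩
        · exact (PySem.List.sorted_pairwise _ _).imp_of_mem (fun {a b} ha hb hle =>
            pvKey_le_of_ord_eq (by rw [pvTail_ord ha, pvTail_ord hb]) hle)
        · intro a ha b hb
          rw [pvMem_bucket ha]
          exact htail "win" (by simp [pvModifiers]) b hb
      · intro a ha b hb
        rw [pvMem_bucket ha]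
        rcases List.mem_append.mp hb with hb' | hb'
        · rw [pvMem_bucket hb']
          exact pvKey_le_of_ord_lt (by decide)
        · exact htail "shift" (by simp [pvModifiers]) b hb'
    · intro a ha b hb
      rw [pvMem_bucket ha]
      rcases List.mem_append.mp hb with hb' | hb'
      · rw [pvMem_bucket hb']
        exact pvKey_le_of_ord_lt (by decide)
      rcases List.mem_append.mp hb' with hb'' | hb''
      · rw [pvMem_bucket hb'']
        exact pvKey_le_of_ord_lt (by decide)
      · exact htail "alt" (by simp [pvModifiers]) b hb''
  · intro a ha b hb
    rw [pvMem_bucket ha]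
    rcases List.mem_append.mp hb with hb' | hb'
    · rw [pvMem_bucket hb']
      exact pvKey_le_of_ord_lt (by decide)
    rcases List.mem_append.mp hb' with hb'' | hb''
    · rw [pvMem_bucket hb'']
      exact pvKey_le_of_ord_lt (by decide)
    rcases List.mem_append.mp hb'' with hb3 | hb3
    · rw [pvMem_bucket hb3]
      exact pvKey_le_of_ord_lt (by decide)
    · exact htail "ctrl" (by simp [pvModifiers]) b hb3

theorem pvMain (l : List String) :
    PySem.List.sorted l pvKey false =
    pvModifiers.flatMap (fun m => l.filter (fun t => t == m)) ++
      PySem.List.sorted (l.filter (fun t => !(pvModifiers.contains t))) (fun t => t) false := by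
  have hperm : (pvModifiers.flatMap (fun m => l.filter (fun t => t == m)) ++
      PySem.List.sorted (l.filter (fun t => !(pvModifiers.contains t))) (fun t => t) false).Perm l :=
    List.Perm.trans (List.Perm.append_left _ (PySem.List.sorted_perm _ _ _)) (pvPerm_core l)
  calc PySem.List.sorted l pvKey false
      = PySem.List.sorted (pvModifiers.flatMap (fun m => l.filter (fun t => t == m)) ++
          PySem.List.sorted (l.filter (fun t => !(pvModifiers.contains t))) (fun t => t) false) pvKey false :=
        PySem.List.sorted_eq_sorted_of_perm _ _ pvKey pvKey_inj hperm.symm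
    _ = _ := PySem.List.sorted_eq_self_of_pairwise _ pvKey (pvPairwise_core l)

theorem pvGen (ps : List String) :
    PySem.List.sorted ((ps.map (fun p => PySem.Str.lower (PySem.Str.strip p))).map
      (fun p => PySem.Dict.getD (PySem.Dict.ofList
        [("control","ctrl"),("ctrl","ctrl"),("alt","alt"),("shift","shift"),
         ("win","win"),("super","win"),("meta","win"),("enter","enter"),
         ("return","enter"),("esc","esc"),("escape","esc")]) p p))
      (fun x => toLex (PySem.Dict.getD (PySem.Dict.ofList
        [("ctrl",(0:Int)),("alt",1),("shift",2),("win",3)]) x 9, x)) false =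
    pvModifiers.flatMap (fun m =>
        (ps.map (fun p => pvNormalize (PySem.Str.lower (PySem.Str.strip p)))).filter
          (fun t => t == m)) ++
      PySem.List.sorted ((ps.map (fun p => pvNormalize (PySem.Str.lower (PySem.Str.strip p)))).filter
        (fun t => !(pvModifiers.contains t))) (fun t => t) false := by
  have hm : List.map ((fun p => PySem.Dict.getD (PySem.Dict.ofList
        [("control","ctrl"),("ctrl","ctrl"),("alt","alt"),("shift","shift"),
         ("win","win"),("super","win"),("meta","win"),("enter","enter"),
         ("return","enter"),("esc","esc"),("escape","esc")]) p p) ∘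
        (fun p => PySem.Str.lower (PySem.Str.strip p))) ps =
      List.map (fun p => pvNormalize (PySem.Str.lower (PySem.Str.strip p))) ps := by
    refine List.map_congr_left (fun a _ => ?_)
    simp only [Function.comp_apply]
    exact pvNorm_eq (PySem.Str.lower (PySem.Str.strip a))
  rw [List.map_map, hm]
  exact pvMain _

-- ===== VERDICT (by name: the statement is the Claim_ definition above) =====
theorem parse_hotkey_string_py_spec : Claim_equal_parse_hotkey_string_py := by
  intro hs _
  show parse_hotkey_string_py hs = parse_hotkey_string_py_alt hs
  by_cases h : hs = ""
  · subst h; decide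
  · unfold parse_hotkey_string_py parse_hotkey_string_py_alt
    rw [if_neg h]
    exact pvGen _
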